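-- pv_equiv track=rewrite | github.com/Arnav1343/vosk-transcription | TextEXT.py | extract_regulatory_prompt
-- ===== SOURCE A (Python) =====
-- from typing import Dict, List, Set
--
-- REGULATORY_PROMPT_PHRASES = [
--     # Recording/disclosure (high confidence)
--     "this call may be recorded",
--     "this call is being recorded",
--     "this call is recorded",
--     "for quality assurance",
--     "for training purposes",
--     "calls are monitored",
--     "calls may be monitored",
--
--     # Explicit consent prompts
--     "do you consent",
--     "do you agree to",
--     "do i have your permission",
--     "do you authorize",
--
--     # Identity verification (specific)
--     "verify your address",
--     "verify your phone number",
--     "verify your phone",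
--     "verify your name",
--     "verify your identity",
--     "confirm your address",
--     "confirm your phone number",
--     "confirm your identity",
--     "for verification purposes"
-- ]
--
-- def extract_regulatory_prompt(text: str) -> List[Dict]:
--     """Extract compliance/verification prompts (deduplicated)."""
--     text_lower = text.lower()
--     matches = []
--
--     for phrase in REGULATORY_PROMPT_PHRASES:
--         if phrase in text_lower:
--             matches.append({
--                 "phrase": phrase,
--                 "length": len(phrase)
--             })
--
--     if not matches:
--         return []
--
--     # Deduplicate: keep only the longest/most specific match
--     best_match = max(matches, key=lambda x: x["length"])
--
--     return [{
--         "type": "regulatory_prompt",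
--         "matched_phrase": best_match["phrase"],
--         "evidence": f"contains '{best_match['phrase']}'"
--     }]
-- ===== SOURCE B (Python) =====
-- from typing import Dict, List
--
-- REGULATORY_PROMPT_PHRASES = [
--     "this call may be recorded",
--     "this call is being recorded",
--     "this call is recorded",
--     "for quality assurance",
--     "for training purposes",
--     "calls are monitored",
--     "calls may be monitored",
--     "do you consent",
--     "do you agree to",
--     "do i have your permission",
--     "do you authorize",
--     "verify your address",
--     "verify your phone number",
--     "verify your phone",
--     "verify your name",
--     "verify your identity",
--     "confirm your address",
--     "confirm your phone number",
--     "confirm your identity",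
--     "for verification purposes"
-- ]
--
-- # Phrases pre-sorted once by descending length; the stable sort keeps original
-- # order among equal lengths, which matches max()'s first-maximal tie-break.
-- _PHRASES_BY_LENGTH = sorted(REGULATORY_PROMPT_PHRASES, key=len, reverse=True)
--
-- def extract_regulatory_prompt(text: str) -> List[Dict]:
--     """Extract compliance/verification prompts (deduplicated)."""
--     text_lower = text.lower()
--     for phrase in _PHRASES_BY_LENGTH:
--         if phrase in text_lower:
--             return [{
--                 "type": "regulatory_prompt",
--                 "matched_phrase": phrase,
--                 "evidence": f"contains '{phrase}'"
--             }]
--     return []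
-- ===== Notes on version B (the rewrite author's own statement) =====
-- stated objective: alternative
-- what changed: B pre-sorts the phrase list once by descending length (stable, so original order is kept among equal lengths) and returns at the first substring match, replacing A's collect-all-matches list plus max(key=length) pass with a sort-then-first-match short-circuit.
import Mathlib
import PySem

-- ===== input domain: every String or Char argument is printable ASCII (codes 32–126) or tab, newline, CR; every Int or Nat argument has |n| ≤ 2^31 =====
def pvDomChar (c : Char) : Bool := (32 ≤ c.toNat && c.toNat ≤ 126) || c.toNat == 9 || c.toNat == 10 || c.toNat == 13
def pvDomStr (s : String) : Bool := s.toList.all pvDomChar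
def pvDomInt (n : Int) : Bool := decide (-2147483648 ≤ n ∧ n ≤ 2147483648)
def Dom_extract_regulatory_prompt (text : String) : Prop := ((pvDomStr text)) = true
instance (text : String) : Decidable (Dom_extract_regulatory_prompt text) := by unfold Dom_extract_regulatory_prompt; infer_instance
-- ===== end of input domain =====

-- B pre-sorts the phrase list by descending length once (stable) and returns the first substring match, instead of A's collect-all-matches + max() pass.


-- ===== PORT A =====
-- module-level constant REGULATORY_PROMPT_PHRASES (shared by both Pythons)
def pvPhrases : List String :=
  ["this call may be recorded",
   "this call is being recorded",
   "this call is recorded",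
   "for quality assurance",
   "for training purposes",
   "calls are monitored",
   "calls may be monitored",
   "do you consent",
   "do you agree to",
   "do i have your permission",
   "do you authorize",
   "verify your address",
   "verify your phone number",
   "verify your phone",
   "verify your name",
   "verify your identity",
   "confirm your address",
   "confirm your phone number",
   "confirm your identity",
   "for verification purposes"]

-- A: build the list of match records {phrase, length}, then max(matches, key=length), then wrap.
def extract_regulatory_prompt (text : String) : List (List (String × String)) :=
  let text_lower := PySem.Str.lower text
  let matchList : List (String × Int) :=
    pvPhrases.foldl
      (fun acc phrase =>
        if PySem.Str.isIn phrase text_lower then acc ++ [(phrase, PySem.Str.len phrase)] else acc) []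
  if matchList = [] then []
  else
    match PySem.List.max? matchList (fun x => x.2) with
    | none => []
    | some best =>
        [[("type", "regulatory_prompt"),
          ("matched_phrase", best.1),
          ("evidence", "contains '" ++ best.1 ++ "'")]]

-- ===== PORT B =====
-- Source B's module constant _PHRASES_BY_LENGTH = sorted(REGULATORY_PROMPT_PHRASES, key=len, reverse=True)
def pvPhrasesByLength : List String := PySem.List.sorted pvPhrases PySem.Str.len true

-- B: scan the length-descending list and return at the first substring match.
def extract_regulatory_prompt_alt (text : String) : List (List (String × String)) :=
  let text_lower := PySem.Str.lower text
  match pvPhrasesByLength.find? (fun phrase => PySem.Str.isIn phrase text_lower) with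
  | some phrase =>
      [[("type", "regulatory_prompt"),
        ("matched_phrase", phrase),
        ("evidence", "contains '" ++ phrase ++ "'")]]
  | none => []

-- ===== PRECONDITION & SPEC =====
def Spec_extract_regulatory_prompt (text : String) (out : List (List (String × String))) : Prop := out = extract_regulatory_prompt_alt text
instance (text : String) (out : List (List (String × String))) : Decidable (Spec_extract_regulatory_prompt text out) := by unfold Spec_extract_regulatory_prompt; infer_instance

-- ===== CLAIM (what is proved, stated in full; the proofs are below) =====
def Claim_equal_extract_regulatory_prompt : Prop := ∀ (text : String), Dom_extract_regulatory_prompt text → Spec_extract_regulatory_prompt text (extract_regulatory_prompt text)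

-- ===== LEMMAS AND PROOFS =====

-- the merge step of Python's max(..., key=len) on (phrase, length) records
def pvStepA (acc : Option (String × Int)) (x : String × Int) : Option (String × Int) :=
  match acc with
  | none => some x
  | some m => if m.2 < x.2 then some x else some m

-- running first-maximal-by-length phrase (strictly longer replaces)
def pvStepB (acc : Option String) (x : String) : Option String :=
  match acc with
  | none => some x
  | some m => if PySem.Str.len m < PySem.Str.len x then some x else some m

-- one loop step: fold pvStepB over the phrases that occur in tl
def pvG (tl : String) (acc : Option String) (p : String) : Option String :=
  if PySem.Str.isIn p tl then pvStepB acc p else acc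

-- the shared result shape
def pvRender (o : Option String) : List (List (String × String)) :=
  match o with
  | some phrase =>
      [[("type", "regulatory_prompt"),
        ("matched_phrase", phrase),
        ("evidence", "contains '" ++ phrase ++ "'")]]
  | none => []

-- the max?-fold over the mapped (phrase, length) list is the mapped running-best fold
theorem pv_fold_map : ∀ (l : List String) (acc : Option String),
    (l.map (fun p => (p, PySem.Str.len p))).foldl pvStepA
      (acc.map (fun p => (p, PySem.Str.len p)))
    = Option.map (fun p => (p, PySem.Str.len p)) (l.foldl pvStepB acc) := by
  intro l
  induction l with
  | nil => intro acc; rfl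
  | cons x t ih =>
    intro acc
    simp only [List.map_cons, List.foldl_cons]
    cases acc with
    | none => exact ih (some x)
    | some b =>
      simp only [Option.map_some]
      by_cases h : PySem.Str.len b < PySem.Str.len x
      · rw [show pvStepA (some (b, PySem.Str.len b)) (x, PySem.Str.len x)
              = some (x, PySem.Str.len x) by simp only [pvStepA]; rw [if_pos h],
            show pvStepB (some b) x = some x by simp only [pvStepB]; rw [if_pos h]]
        exact ih (some x)
      · rw [show pvStepA (some (b, PySem.Str.len b)) (x, PySem.Str.len x)
              = some (b, PySem.Str.len b) by simp only [pvStepA]; rw [if_neg h],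
            show pvStepB (some b) x = some b by simp only [pvStepB]; rw [if_neg h]]
        exact ih (some b)

-- A's whole body computes pvRender of the running-best fold over the original list
theorem pvA_eq (text : String) :
    extract_regulatory_prompt text
      = pvRender (pvPhrases.foldl (pvG (PySem.Str.lower text)) none) := by
  unfold extract_regulatory_prompt
  dsimp only
  rw [PySem.List.foldl_congr_mem pvPhrases (pvG (PySem.Str.lower text))
      (fun acc phrase =>
        if PySem.Str.isIn phrase (PySem.Str.lower text) then pvStepB acc phrase else acc)
      none (by intro acc x _; rfl)]
  rw [← List.foldl_filter
      (p := fun phrase => PySem.Str.isIn phrase (PySem.Str.lower text))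
      (f := pvStepB)]
  rw [PySem.List.foldl_append_if
      (fun phrase => PySem.Str.isIn phrase (PySem.Str.lower text))
      (fun phrase => (phrase, PySem.Str.len phrase))]
  set fl := pvPhrases.filter (fun phrase => PySem.Str.isIn phrase (PySem.Str.lower text)) with hfl
  clear_value fl
  simp only [List.nil_append]
  have hmax : PySem.List.max? (fl.map (fun phrase => (phrase, PySem.Str.len phrase)))
      (fun x => x.2) = (fl.map (fun phrase => (phrase, PySem.Str.len phrase))).foldl pvStepA none := by
    unfold PySem.List.max?
    exact PySem.List.foldl_congr_mem _ _ pvStepA none (fun acc x _ => by cases acc <;> rfl)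
  have hmap : (fl.map (fun phrase => (phrase, PySem.Str.len phrase))).foldl pvStepA none
      = Option.map (fun phrase => (phrase, PySem.Str.len phrase)) (fl.foldl pvStepB none) :=
    pv_fold_map fl none
  rw [hmax, hmap]
  cases hb : fl.foldl pvStepB none with
  | none =>
    have : fl = [] := by
      cases fl with
      | nil => rfl
      | cons x t =>
        exfalso
        -- a fold of pvStepB starting from a some can never be none
        have hsome : ∀ (m : List String) (b : String), m.foldl pvStepB (some b) ≠ none := by
          intro m
          induction m with
          | nil => intro b h; simp at h
          | cons y s ih =>
            intro b
            simp only [List.foldl_cons, pvStepB]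
            split <;> exact ih _
        exact hsome t x (by simpa [pvStepB] using hb)
    rw [this]
    rfl
  | some p =>
    have hne : fl.map (fun phrase => (phrase, PySem.Str.len phrase)) ≠ [] := by
      intro hM
      rw [List.map_eq_nil_iff] at hM
      rw [hM] at hb
      simp at hb
    rw [if_neg hne]
    rfl

-- B's whole body is pvRender of find? over the pre-sorted list
theorem pvB_eq (text : String) :
    extract_regulatory_prompt_alt text
      = pvRender (pvPhrasesByLength.find?
          (fun phrase => PySem.Str.isIn phrase (PySem.Str.lower text))) := by
  rfl

-- local commutation: a strictly shorter phrase may be processed after a longer one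
theorem pvG_comm (tl : String) (x p : String) (h : PySem.Str.len p < PySem.Str.len x)
    (acc : Option String) : pvG tl (pvG tl acc x) p = pvG tl (pvG tl acc p) x := by
  cases acc <;> simp only [pvG, pvStepB] <;> split_ifs <;>
    simp only [pvStepB] <;> split_ifs <;> first | rfl | omega

-- a strictly-longer element may move from the front of a list of shorter ones to its back
theorem pv_fold_snoc (tl : String) (x : String) :
    ∀ (m : List String), (∀ p ∈ m, PySem.Str.len p < PySem.Str.len x) →
    ∀ (acc : Option String),
      (x :: m).foldl (pvG tl) acc = (m ++ [x]).foldl (pvG tl) acc := by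
  intro m
  induction m with
  | nil => intro _ acc; rfl
  | cons p m' ih =>
    intro hm acc
    have hp : PySem.Str.len p < PySem.Str.len x := hm p (List.mem_cons_self ..)
    calc (x :: p :: m').foldl (pvG tl) acc
        = m'.foldl (pvG tl) (pvG tl (pvG tl acc x) p) := rfl
      _ = m'.foldl (pvG tl) (pvG tl (pvG tl acc p) x) := by rw [pvG_comm tl x p hp acc]
      _ = (x :: m').foldl (pvG tl) (pvG tl acc p) := rfl
      _ = (m' ++ [x]).foldl (pvG tl) (pvG tl acc p) :=
          ih (fun q hq => hm q (List.mem_cons_of_mem _ hq)) _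
      _ = ((p :: m') ++ [x]).foldl (pvG tl) acc := rfl

-- stable descending insertion does not change the fold
theorem pv_fold_insertBy (tl : String) (x : String) :
    ∀ (S : List String),
      S.Pairwise (fun a b => PySem.Str.len b ≤ PySem.Str.len a) →
    ∀ (acc : Option String),
      (PySem.List.insertBy (fun a b => decide (PySem.Str.len b < PySem.Str.len a)) x S).foldl
        (pvG tl) acc = (S ++ [x]).foldl (pvG tl) acc := by
  intro S
  induction S with
  | nil => intro _ acc; rfl
  | cons y t ih =>
    intro hS acc
    rw [List.pairwise_cons] at hS
    unfold PySem.List.insertBy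
    by_cases hxy : PySem.Str.len y < PySem.Str.len x
    · rw [if_pos (by exact decide_eq_true hxy)]
      exact pv_fold_snoc tl x (y :: t)
        (by
          intro p hp
          rcases List.mem_cons.mp hp with h | h
          · exact h ▸ hxy
          · exact lt_of_le_of_lt (hS.1 p h) hxy) acc
    · rw [if_neg (by simpa using hxy)]
      show (PySem.List.insertBy _ x t).foldl (pvG tl) (pvG tl acc y) = _
      rw [ih hS.2 (pvG tl acc y)]
      rfl

-- sorting one more element on the right
theorem pv_sorted_snoc (l : List String) (x : String) :
    PySem.List.sorted (l ++ [x]) PySem.Str.len true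
      = PySem.List.insertBy (fun a b => decide (PySem.Str.len b < PySem.Str.len a)) x
          (PySem.List.sorted l PySem.Str.len true) := by
  rw [PySem.List.sorted_rev_eq_foldl_insertBy, PySem.List.sorted_rev_eq_foldl_insertBy,
      List.foldl_append]
  rfl

-- the running-best fold is invariant under the stable descending sort
theorem pv_fold_sorted (tl : String) :
    ∀ (l : List String),
      (PySem.List.sorted l PySem.Str.len true).foldl (pvG tl) none
        = l.foldl (pvG tl) none := by
  intro l
  induction l using List.reverseRecOn with
  | nil => rfl
  | append_singleton l x ih =>
    rw [pv_sorted_snoc,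
        pv_fold_insertBy tl x _ (PySem.List.sorted_pairwise_rev l PySem.Str.len) none,
        List.foldl_append, List.foldl_append, ih]

-- once from a long-enough best, shorter-or-equal phrases never replace it
theorem pv_fold_keep (tl : String) (b : String) :
    ∀ (t : List String), (∀ p ∈ t, PySem.Str.len p ≤ PySem.Str.len b) →
      t.foldl (pvG tl) (some b) = some b := by
  intro t
  induction t with
  | nil => intro _; rfl
  | cons y s ih =>
    intro ht
    have hy : ¬ PySem.Str.len b < PySem.Str.len y := not_lt.mpr (ht y (List.mem_cons_self ..))
    have : pvG tl (some b) y = some b := by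
      simp only [pvG, pvStepB]
      rw [if_neg hy]
      split <;> rfl
    rw [List.foldl_cons, this]
    exact ih (fun p hp => ht p (List.mem_cons_of_mem _ hp))

-- on a length-descending list, the running-best fold is the first match
theorem pv_fold_desc_find (tl : String) :
    ∀ (S : List String),
      S.Pairwise (fun a b => PySem.Str.len b ≤ PySem.Str.len a) →
      S.foldl (pvG tl) none = S.find? (fun p => PySem.Str.isIn p tl) := by
  intro S
  induction S with
  | nil => intro _; rfl
  | cons y t ih =>
    intro hS
    rw [List.pairwise_cons] at hS
    by_cases hy : PySem.Str.isIn y tl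
    · rw [List.find?_cons_of_pos (by simpa using hy)]
      show t.foldl (pvG tl) (pvG tl none y) = some y
      rw [show pvG tl none y = some y by unfold pvG pvStepB; rw [if_pos hy]]
      exact pv_fold_keep tl y t hS.1
    · rw [List.find?_cons_of_neg (by simpa using hy)]
      show t.foldl (pvG tl) (pvG tl none y) = _
      rw [show pvG tl none y = none by unfold pvG; rw [if_neg hy]]
      exact ih hS.2

theorem extract_regulatory_prompt_agree (text : String) :
    extract_regulatory_prompt text = extract_regulatory_prompt_alt text := by
  rw [pvA_eq, pvB_eq]
  unfold pvPhrasesByLength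
  rw [← pv_fold_sorted (PySem.Str.lower text) pvPhrases,
      pv_fold_desc_find (PySem.Str.lower text) _
        (PySem.List.sorted_pairwise_rev pvPhrases PySem.Str.len)]

-- ===== VERDICT (by name: the statement is the Claim_ definition above) =====
theorem extract_regulatory_prompt_spec : Claim_equal_extract_regulatory_prompt := by
  intro text _
  exact extract_regulatory_prompt_agree text
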